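-- pv_equiv track=rewrite | github.com/psv-git/labs | MLITA/Lab6/src/functions.py | string_to_long
-- ===== SOURCE A (Python) =====
-- def string_to_long(str_num, base_power=3):
--     lng_num = []
--     dig_count = 0
--     curr_num = ""
--     for i in range(len(str_num)-1, -1, -1):
--         dig_count += 1
--         curr_num += str_num[i]
--         if dig_count == base_power:
--             lng_num.append(int(curr_num[::-1]))
--             dig_count = 0
--             curr_num = ""
--     if len(curr_num):
--         lng_num.append(int(curr_num[::-1]))
--     return lng_num
-- ===== SOURCE B (Python) =====
-- def string_to_long(str_num, base_power=3):
--     chunks = []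
--     i = len(str_num)
--     while i > 0:
--         chunks.append(int(str_num[max(0, i - base_power):i]))
--         i -= base_power
--     return chunks
-- ===== Notes on version B (the rewrite author's own statement) =====
-- stated objective: simpler
-- what changed: B slices the fixed-size chunks directly off the right end of the string (while i > 0: append int(str_num[max(0, i - base_power):i]); i -= base_power) instead of A's per-character reversed accumulation with a digit counter and a string reversal per chunk; Pre_ excludes non-positive base_power with a non-empty string, a meaningless chunk size on which A's single whole-string chunk is an accident of its never-firing flush while B's first slice is empty and int('') raises ValueError, and (like A's own domain) strings with a chunk int() cannot parse, where A raises ValueError.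
-- outside the precondition, e.g. on string_to_long('12', 0): A returns [12], B raises ValueError; on string_to_long('12', -1): A returns [12], B raises ValueError
import Mathlib
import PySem

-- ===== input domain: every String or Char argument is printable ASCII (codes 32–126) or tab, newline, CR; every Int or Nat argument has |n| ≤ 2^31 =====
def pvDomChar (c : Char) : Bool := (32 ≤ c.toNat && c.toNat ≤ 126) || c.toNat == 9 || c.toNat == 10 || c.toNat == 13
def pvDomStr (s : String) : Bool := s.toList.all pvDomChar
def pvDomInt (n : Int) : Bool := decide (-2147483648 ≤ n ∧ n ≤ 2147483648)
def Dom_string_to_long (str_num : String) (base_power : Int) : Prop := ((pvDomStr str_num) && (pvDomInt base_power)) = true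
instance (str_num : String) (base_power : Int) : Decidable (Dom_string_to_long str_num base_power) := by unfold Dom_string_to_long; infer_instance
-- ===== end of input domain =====

-- B replaces A's char-by-char reversed accumulation with direct slicing of the
-- fixed-size chunks from the right (objective: simpler, same ordered result).

-- int(cs) with default 0 (Python raises exactly where ofChars? is none; excluded by Pre_)
def pvIntD (cs : List Char) : Int := (PySem.Int.ofChars? cs).getD 0

-- ===== PORT A =====
-- loop body of A: dig_count += 1; curr_num += str_num[i]; flush when dig_count == base_power
-- (int(curr_num[::-1]) : s[::-1] is reverse)
def pvAStep (bp : Int) (s : List Char) (st : List Int × Int × List Char) (i : Int) :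
    List Int × Int × List Char :=
  let cnt := st.2.1 + 1
  let cur := st.2.2 ++ [PySem.List.pyGetD s i ' ']
  if cnt = bp then (st.1 ++ [pvIntD cur.reverse], 0, []) else (st.1, cnt, cur)

def string_to_long (str_num : String) (base_power : Int) : List Int :=
  let s := str_num.toList
  let r := (PySem.List.pyRange (PySem.Str.len str_num - 1) (-1) (-1)).foldl
            (pvAStep base_power s) ([], 0, [])
  if r.2.2.length ≠ 0 then r.1 ++ [pvIntD r.2.2.reverse] else r.1

-- ===== PORT B =====
-- while i > 0: append int(str_num[max(0, i - base_power):i]); i -= base_power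
-- (the 0 < bp conjunct in the guard only makes the recursion total in Lean: for
--  bp ≤ 0 on a non-empty string the Python slice is empty and int('') raises
--  ValueError, and Pre_ excludes those inputs)
def pvBChunk (s : List Char) (bp : Int) (i : Int) : List Int :=
  if _h : 0 < i ∧ 0 < bp then
    pvIntD (PySem.List.slice s (some (max 0 (i - bp))) (some i)) :: pvBChunk s bp (i - bp)
  else []
termination_by i.toNat
decreasing_by omega

def string_to_long_alt (str_num : String) (base_power : Int) : List Int :=
  pvBChunk str_num.toList base_power (str_num.toList.length : Int)

-- ===== PRECONDITION & SPEC =====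
-- Pre_ excludes exactly (i) non-positive base_power with a non-empty string — a meaningless
-- chunk size on which A's single whole-string chunk is an accident of its never-firing flush
-- while B raises ValueError on its first, empty slice — and (ii) for positive base_power, strings in which some
-- fixed-size chunk is not int()-parsable, where A itself raises ValueError.
def Pre_string_to_long (str_num : String) (base_power : Int) : Prop :=
  if base_power ≤ 0 then str_num.toList = []
  else ∀ k < (str_num.toList.length + base_power.toNat - 1) / base_power.toNat,
    (PySem.Int.ofChars?
        ((str_num.toList.take (str_num.toList.length - k * base_power.toNat)).drop
          (str_num.toList.length - (k + 1) * base_power.toNat))).isSome = true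
instance (str_num : String) (base_power : Int) : Decidable (Pre_string_to_long str_num base_power) := by
  unfold Pre_string_to_long; infer_instance

def pvWitness_string_to_long : String × Int := ("123456", 3)

def Spec_string_to_long (str_num : String) (base_power : Int) (out : List Int) : Prop := out = string_to_long_alt str_num base_power
instance (str_num : String) (base_power : Int) (out : List Int) : Decidable (Spec_string_to_long str_num base_power out) := by unfold Spec_string_to_long; infer_instance

-- ===== CLAIM (what is proved, stated in full; the proofs are below) =====
def Claim_equal_string_to_long : Prop := ∀ (str_num : String) (base_power : Int), Dom_string_to_long str_num base_power → Pre_string_to_long str_num base_power → Spec_string_to_long str_num base_power (string_to_long str_num base_power)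

-- ===== LEMMAS AND PROOFS =====

-- A's loop body on the character it reads (pvAStep with the index resolved)
def pvACore (bp : Int) (st : List Int × Int × List Char) (c : Char) :
    List Int × Int × List Char :=
  let cnt := st.2.1 + 1
  let cur := st.2.2 ++ [c]
  if cnt = bp then (st.1 ++ [pvIntD cur.reverse], 0, []) else (st.1, cnt, cur)

-- A's final flush of a leftover partial chunk
def pvFinish (r : List Int × Int × List Char) : List Int :=
  if r.2.2.length ≠ 0 then r.1 ++ [pvIntD r.2.2.reverse] else r.1

lemma pvA_eq_revFold (bp : Int) (s : String) (st : List Int × Int × List Char) :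
    (PySem.List.pyRange (PySem.Str.len s - 1) (-1) (-1)).foldl (pvAStep bp s.toList) st
      = s.toList.reverse.foldl (pvACore bp) st := by
  have h1 : PySem.List.pyRange (PySem.Str.len s - 1) (-1) (-1)
      = (PySem.List.pyRange 0 (s.toList.length : Int) 1).reverse := by
    rw [PySem.List.pyRange_neg_one_eq_reverse]
    norm_num [PySem.Str.len_eq]
  rw [h1]
  conv_rhs => rw [← PySem.List.map_pyGetD_pyRange_zero' s.toList ' ']
  rw [← List.map_reverse, List.foldl_map]
  rfl

-- already-appended output is just carried through the fold
lemma pvACore_acc (bp : Int) (l : List Char) (acc : List Int) (cnt : Int) (cur : List Char) :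
    l.foldl (pvACore bp) (acc, cnt, cur)
      = (acc ++ (l.foldl (pvACore bp) ([], cnt, cur)).1,
         (l.foldl (pvACore bp) ([], cnt, cur)).2) := by
  induction l generalizing acc cnt cur with
  | nil => simp
  | cons c l ih =>
    simp only [List.foldl_cons, pvACore]
    by_cases hf : cnt + 1 = bp
    · simp only [if_pos hf]
      rw [ih (acc ++ [pvIntD (cur ++ [c]).reverse]) 0 [],
          ih ([] ++ [pvIntD (cur ++ [c]).reverse]) 0 []]
      simp
    · simp only [if_neg hf]
      exact ih acc (cnt + 1) (cur ++ [c])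

-- consuming exactly the bp - cnt missing characters flushes one chunk
lemma pvACore_flush (bp : Int) (l1 l2 : List Char) (acc : List Int) (cnt : Int) (cur : List Char)
    (h0 : 0 ≤ cnt) (hlen : cnt + (l1.length : Int) = bp) (hne : l1 ≠ []) :
    (l1 ++ l2).foldl (pvACore bp) (acc, cnt, cur)
      = l2.foldl (pvACore bp) (acc ++ [pvIntD (cur ++ l1).reverse], 0, []) := by
  induction l1 generalizing cnt cur with
  | nil => exact absurd rfl hne
  | cons c l1 ih =>
    simp only [List.cons_append, List.foldl_cons, pvACore]
    rcases l1 with _ | ⟨d, l1⟩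
    · have : cnt + 1 = bp := by simp at hlen; omega
      simp [if_pos this]
    · have hf : cnt + 1 ≠ bp := by simp at hlen; omega
      simp only [if_neg hf]
      rw [ih (cnt + 1) (cur ++ [c]) (by omega) (by simp at hlen ⊢; omega) (by simp)]
      simp

-- no flush happens while the counter cannot reach bp
lemma pvACore_noflush (bp : Int) (l : List Char) (acc : List Int) (cnt : Int) (cur : List Char)
    (h : cnt + (l.length : Int) < bp ∨ bp ≤ cnt) :
    l.foldl (pvACore bp) (acc, cnt, cur) = (acc, cnt + l.length, cur ++ l) := by
  induction l generalizing cnt cur with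
  | nil => simp
  | cons c l ih =>
    have hf : cnt + 1 ≠ bp := by rcases h with h | h <;> simp at h ⊢ <;> omega
    simp only [List.foldl_cons, pvACore, if_neg hf]
    rw [ih (cnt + 1) (cur ++ [c]) (by
      rcases h with h | h
      · left; simp at h; omega
      · right; omega)]
    simp
    omega

-- B's chunk loop only reads the first i characters
lemma pvBChunk_append (bp : Int) (s t : List Char) (i : Int) (hi : i ≤ s.length) :
    pvBChunk (s ++ t) bp i = pvBChunk s bp i := by
  have H : ∀ (k : Nat) (i : Int), i.toNat = k → i ≤ s.length →
      pvBChunk (s ++ t) bp i = pvBChunk s bp i := by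
    intro k
    induction k using Nat.strong_induction_on with
    | _ k ih =>
      intro i hk hi
      conv_lhs => rw [pvBChunk]
      conv_rhs => rw [pvBChunk]
      by_cases h : 0 < i ∧ 0 < bp
      · rw [dif_pos h, dif_pos h]
        have h0 : (0 : Int) ≤ max 0 (i - bp) := le_max_left _ _
        have hslice : PySem.List.slice (s ++ t) (some (max 0 (i - bp))) (some i)
            = PySem.List.slice s (some (max 0 (i - bp))) (some i) := by
          rw [PySem.List.slice_toNat _ h0 (by omega), PySem.List.slice_toNat _ h0 (by omega)]
          rw [List.drop_append_of_le_length (by omega),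
              List.take_append_of_le_length (by simp; omega)]
        rw [hslice, ih (i - bp).toNat (by omega) (i - bp) rfl (by omega)]
      · rw [dif_neg h, dif_neg h]
  exact H i.toNat i rfl hi

-- pvFinish ignores a prepended output prefix
lemma pvFinish_acc (acc a : List Int) (p : Int × List Char) :
    pvFinish (acc ++ a, p) = acc ++ pvFinish (a, p) := by
  unfold pvFinish
  split_ifs <;> simp

-- the heart: A's reversed accumulation equals B's slicing, for positive bp
lemma pvMain (bp : Int) (hbp : 0 < bp) (s : List Char) :
    pvFinish (s.reverse.foldl (pvACore bp) ([], 0, []))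
      = pvBChunk s bp (s.length : Int) := by
  have H : ∀ (n : Nat) (s : List Char), s.length = n →
      pvFinish (s.reverse.foldl (pvACore bp) ([], 0, [])) = pvBChunk s bp (s.length : Int) := by
    intro n
    induction n using Nat.strong_induction_on with
    | _ n ih =>
      intro s hs
      by_cases h0 : s.length = 0
      · have hnil : s = [] := List.length_eq_zero_iff.mp h0
        subst hnil
        rw [pvBChunk]
        simp [pvFinish]
      · by_cases hsmall : (s.length : Int) < bp
        · -- the whole string is a single partial chunk
          rw [pvACore_noflush bp s.reverse [] 0 [] (by left; simp; omega)]
          conv_rhs => rw [pvBChunk]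
          rw [dif_pos ⟨by omega, hbp⟩]
          have hmax : max 0 ((s.length : Int) - bp) = 0 := by omega
          rw [hmax, PySem.List.slice_zero_start, PySem.List.slice_to _ (by omega)]
          conv_rhs => rw [pvBChunk]
          rw [dif_neg (by omega)]
          simp [pvFinish, h0]
        · -- a full chunk of bp characters is flushed, then recurse
          have hble : bp ≤ (s.length : Int) := by omega
          have hm : s.length - bp.toNat < s.length := by omega
          have hdlen : (s.drop (s.length - bp.toNat)).length = bp.toNat := by simp; omega
          have hrev : s.reverse = (s.drop (s.length - bp.toNat)).reverse
              ++ (s.take (s.length - bp.toNat)).reverse := by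
            rw [← List.reverse_append, List.take_append_drop]
          rw [hrev, pvACore_flush bp _ _ [] 0 [] le_rfl (by simp [hdlen]; omega) (by simp; omega)]
          simp only [List.nil_append, List.reverse_reverse]
          rw [pvACore_acc, pvFinish_acc, Prod.mk.eta]
          rw [ih (s.length - bp.toNat) (by omega) (s.take (s.length - bp.toNat)) (by simp)]
          have htl : ((s.take (s.length - bp.toNat)).length : Int)
              = ((s.length - bp.toNat : Nat) : Int) := by simp
          rw [htl]
          conv_rhs => rw [pvBChunk]
          rw [dif_pos ⟨by omega, hbp⟩]
          have hmax : max 0 ((s.length : Int) - bp) = ((s.length - bp.toNat : Nat) : Int) := by omega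
          rw [hmax]
          have hslice : PySem.List.slice s (some ((s.length - bp.toNat : Nat) : Int))
              (some (s.length : Int)) = s.drop (s.length - bp.toNat) := by
            rw [PySem.List.slice_natCast]
            exact List.take_of_length_le (by simp)
          rw [hslice]
          have hrec : (s.length : Int) - bp = ((s.length - bp.toNat : Nat) : Int) := by omega
          rw [hrec]
          have hbt : pvBChunk s bp ((s.length - bp.toNat : Nat) : Int)
              = pvBChunk (s.take (s.length - bp.toNat)) bp ((s.length - bp.toNat : Nat) : Int) := by
            have haux := pvBChunk_append bp (s.take (s.length - bp.toNat))
              (s.drop (s.length - bp.toNat)) ((s.length - bp.toNat : Nat) : Int)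
              (by simp)
            rwa [List.take_append_drop] at haux
          rw [hbt]
          simp
  exact H s.length s rfl

lemma string_to_long_eq (s : String) (bp : Int) :
    string_to_long s bp = pvFinish (s.toList.reverse.foldl (pvACore bp) ([], 0, [])) := by
  simp only [string_to_long, pvFinish]
  rw [pvA_eq_revFold]

theorem string_to_long_spec : Claim_equal_string_to_long := by
  intro str_num bp _ hpre
  unfold Spec_string_to_long string_to_long_alt
  rw [string_to_long_eq]
  by_cases hbp : bp ≤ 0
  · unfold Pre_string_to_long at hpre
    rw [if_pos hbp] at hpre
    rw [hpre]
    rw [pvBChunk]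
    simp [pvFinish]
  · exact pvMain bp (by omega) str_num.toList
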